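-- pv_equiv track=rewrite | github.com/ithomas51/my_py_cli_playground | ico_to_svg/src/ico_to_svg/ico_parser.py | select_size
-- ===== SOURCE A (Python) =====
-- from typing import List, Tuple
--
-- def select_size(
--     available: List[Tuple[int, int]], desired: Tuple[int, int] | None
-- ) -> Tuple[int, int]:
--     """Select ICO frame size using priority rules.
--
--     Selection priority:
--     1. Exact match
--     2. Nearest larger size (prefer square, then smallest area)
--     3. Largest available
--
--     Parameters
--     ----------
--     available : List[Tuple[int, int]]
--         Available (width, height) sizes in the ICO.
--     desired : Tuple[int, int] or None
--         Desired (width, height), or None for largest.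
--
--     Returns
--     -------
--     Tuple[int, int]
--         Selected (width, height).
--
--     Raises
--     ------
--     ValueError
--         If no sizes are available.
--
--     Examples
--     --------
--     >>> select_size([(16, 16), (32, 32), (64, 64)], (32, 32))
--     (32, 32)
--     >>> select_size([(16, 16), (64, 64)], (40, 40))
--     (64, 64)
--     >>> select_size([(16, 16), (32, 32)], None)
--     (32, 32)
--     """
--     if not available:
--         raise ValueError("No sizes available in ICO")
--
--     # Largest by area default
--     largest = max(available, key=lambda s: (s[0] * s[1], s[0], s[1]))
--     if not desired:
--         return largest
--
--     dw, dh = desired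
--     # Exact match
--     if (dw, dh) in available:
--         return (dw, dh)
--
--     # Nearest larger candidates (both dimensions >= requested)
--     larger = [(w, h) for (w, h) in available if w >= dw and h >= dh]
--     if larger:
--         # Prefer square (min |w-h|), then lowest area, then smallest width
--         return min(larger, key=lambda s: (abs(s[0] - s[1]), s[0] * s[1], s[0], s[1]))
--
--     # Else largest
--     return largest
-- ===== SOURCE B (Python) =====
-- def select_size(available, desired):
--     if not available:
--         raise ValueError("No sizes available in ICO")
--
--     def priority(size):
--         # Encode the whole selection policy as one comparable rank tuple:
--         # rank 0 = exact match, rank 1 = covers desired (nearness key),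
--         # rank 2 = anything else (reversed largest key).
--         w, h = size
--         if desired:
--             dw, dh = desired
--             if (w, h) == (dw, dh):
--                 return (0, 0, 0, 0, 0)
--             if w >= dw and h >= dh:
--                 return (1, abs(w - h), w * h, w, h)
--         return (2, -(w * h), -w, -h, 0)
--
--     return min(available, key=priority)
-- ===== Notes on version B (the rewrite author's own statement) =====
-- stated objective: simpler
-- what changed: A runs four staged scans (max by largest-key, membership test for the exact match, a filter of covering sizes, min by nearness-key); B instead encodes the entire priority policy in one comparable rank tuple per size (0=exact, 1=covers desired with nearness key, 2=otherwise with reversed largest key) and takes a single min over that key.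
import Mathlib
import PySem

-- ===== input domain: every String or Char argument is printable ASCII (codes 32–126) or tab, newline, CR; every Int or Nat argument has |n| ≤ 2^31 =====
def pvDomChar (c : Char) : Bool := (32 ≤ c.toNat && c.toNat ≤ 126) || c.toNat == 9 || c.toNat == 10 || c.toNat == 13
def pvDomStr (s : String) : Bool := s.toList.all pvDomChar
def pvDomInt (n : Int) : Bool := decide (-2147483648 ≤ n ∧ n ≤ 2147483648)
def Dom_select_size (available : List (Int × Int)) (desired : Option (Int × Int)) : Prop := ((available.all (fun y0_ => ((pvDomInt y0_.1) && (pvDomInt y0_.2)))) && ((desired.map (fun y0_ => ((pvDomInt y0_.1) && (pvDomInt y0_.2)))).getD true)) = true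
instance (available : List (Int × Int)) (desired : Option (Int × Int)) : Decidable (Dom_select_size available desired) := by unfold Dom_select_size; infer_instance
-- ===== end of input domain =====

-- B replaces A's four staged scans (max, membership test, filter, min) by one ranking key per
-- size (0 = exact, 1 = covers desired, 2 = otherwise) and a single min; objective: simpler.

-- ===== PORT A =====
-- Python tuple-lt on A's max key (w*h, w, h) (exact lexicographic comparison)
def lt3 (a b : Int × Int × Int) : Bool :=
  decide (a.1 < b.1 ∨ (a.1 = b.1 ∧ (a.2.1 < b.2.1 ∨ (a.2.1 = b.2.1 ∧ a.2.2 < b.2.2))))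

-- Python tuple-lt on A's min key (|w-h|, w*h, w, h)
def lt4 (a b : Int × Int × Int × Int) : Bool :=
  decide (a.1 < b.1 ∨ (a.1 = b.1 ∧ (a.2.1 < b.2.1 ∨ (a.2.1 = b.2.1 ∧
    (a.2.2.1 < b.2.2.1 ∨ (a.2.2.1 = b.2.2.1 ∧ a.2.2.2 < b.2.2.2))))))

def keyA3 (s : Int × Int) : Int × Int × Int := (s.1 * s.2, s.1, s.2)

def keyA4 (s : Int × Int) : Int × Int × Int × Int := (|s.1 - s.2|, s.1 * s.2, s.1, s.2)

-- Python max with key = first element with strictly maximal key (running fold, exact)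
def pyMaxL (x : Int × Int) (t : List (Int × Int)) : Int × Int :=
  t.foldl (fun m s => if lt3 (keyA3 m) (keyA3 s) then s else m) x

-- Python min with key = first element with strictly minimal key (exact)
def pyMinN (x : Int × Int) (t : List (Int × Int)) : Int × Int :=
  t.foldl (fun m s => if lt4 (keyA4 s) (keyA4 m) then s else m) x

def select_size (available : List (Int × Int)) (desired : Option (Int × Int)) : Int × Int :=
  match available with
  | [] => (0, 0)  -- Python raises ValueError here; excluded by Pre_select_size
  | x :: t =>
    let largest := pyMaxL x t
    match desired with
    | none => largest        -- `not desired`: only None is falsy (a tuple is never empty here)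
    | some (dw, dh) =>
      if (dw, dh) ∈ available then (dw, dh)
      else
        match available.filter (fun s => decide (s.1 ≥ dw) && decide (s.2 ≥ dh)) with
        | [] => largest
        | y :: ys => pyMinN y ys

-- ===== PORT B =====
-- Python tuple-lt on B's 5-component priority key
def ltK (a b : Int × Int × Int × Int × Int) : Bool :=
  decide (a.1 < b.1 ∨ (a.1 = b.1 ∧ (a.2.1 < b.2.1 ∨ (a.2.1 = b.2.1 ∧
    (a.2.2.1 < b.2.2.1 ∨ (a.2.2.1 = b.2.2.1 ∧
      (a.2.2.2.1 < b.2.2.2.1 ∨ (a.2.2.2.1 = b.2.2.2.1 ∧ a.2.2.2.2 < b.2.2.2.2))))))))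

def prioB (desired : Option (Int × Int)) (s : Int × Int) : Int × Int × Int × Int × Int :=
  match desired with
  | some d =>
    if s = d then (0, 0, 0, 0, 0)
    else if s.1 ≥ d.1 ∧ s.2 ≥ d.2 then (1, |s.1 - s.2|, s.1 * s.2, s.1, s.2)
    else (2, -(s.1 * s.2), -s.1, -s.2, 0)
  | none => (2, -(s.1 * s.2), -s.1, -s.2, 0)

def select_size_alt (available : List (Int × Int)) (desired : Option (Int × Int)) : Int × Int :=
  match available with
  | [] => (0, 0)  -- ValueError in Python; excluded by Pre_select_size
  | x :: t =>
    t.foldl (fun m s => if ltK (prioB desired s) (prioB desired m) then s else m) x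

-- ===== PRECONDITION & SPEC =====
-- Python A raises ValueError on an empty list; B raises too, so it is excluded.
def Pre_select_size (available : List (Int × Int)) (_desired : Option (Int × Int)) : Prop :=
  available ≠ []
instance (available : List (Int × Int)) (desired : Option (Int × Int)) : Decidable (Pre_select_size available desired) := by unfold Pre_select_size; infer_instance

def pvWitness_select_size : (List (Int × Int)) × (Option (Int × Int)) := ([(16, 16), (32, 32)], some (20, 20))

def Spec_select_size (available : List (Int × Int)) (desired : Option (Int × Int)) (out : Int × Int) : Prop := out = select_size_alt available desired
instance (available : List (Int × Int)) (desired : Option (Int × Int)) (out : Int × Int) : Decidable (Spec_select_size available desired out) := by unfold Spec_select_size; infer_instance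

-- ===== CLAIM (what is proved, stated in full; the proofs are below) =====
def Claim_equal_select_size : Prop := ∀ (available : List (Int × Int)) (desired : Option (Int × Int)), Dom_select_size available desired → Pre_select_size available desired → Spec_select_size available desired (select_size available desired)

-- ===== LEMMAS AND PROOFS =====

-- B's fold with the accumulator made explicit
def fB (desired : Option (Int × Int)) (m : Int × Int) (t : List (Int × Int)) : Int × Int :=
  t.foldl (fun m s => if ltK (prioB desired s) (prioB desired m) then s else m) m

def larger (d s : Int × Int) : Prop := s.1 ≥ d.1 ∧ s.2 ≥ d.2

-- one-step unfolding (definitional) of the three folds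
theorem fB_cons (desired : Option (Int × Int)) (m s : Int × Int) (t : List (Int × Int)) :
    fB desired m (s :: t) = fB desired (if ltK (prioB desired s) (prioB desired m) then s else m) t := rfl

theorem pyMinN_cons (m s : Int × Int) (t : List (Int × Int)) :
    pyMinN m (s :: t) = pyMinN (if lt4 (keyA4 s) (keyA4 m) then s else m) t := rfl

theorem pyMaxL_cons (m s : Int × Int) (t : List (Int × Int)) :
    pyMaxL m (s :: t) = pyMaxL (if lt3 (keyA3 m) (keyA3 s) then s else m) t := rfl

-- the three shapes of B's priority key
theorem prioB_exact (d : Int × Int) : prioB (some d) d = (0, 0, 0, 0, 0) := by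
  simp [prioB]

theorem prioB_larger (d s : Int × Int) (hsd : s ≠ d) (hsl : s.1 ≥ d.1 ∧ s.2 ≥ d.2) :
    prioB (some d) s = (1, |s.1 - s.2|, s.1 * s.2, s.1, s.2) := by
  simp only [prioB]; rw [if_neg hsd, if_pos hsl]

theorem prioB_other (d s : Int × Int) (hsd : s ≠ d) (hsl : ¬ (s.1 ≥ d.1 ∧ s.2 ≥ d.2)) :
    prioB (some d) s = (2, -(s.1 * s.2), -s.1, -s.2, 0) := by
  simp only [prioB]; rw [if_neg hsd, if_neg hsl]

-- bridge lemmas between the key orders (components generalized, so omega applies)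
theorem ltK_rank1 (a b c e a' b' c' e' : Int) :
    ltK (1, a, b, c, e) (1, a', b', c', e') = lt4 (a, b, c, e) (a', b', c', e') := by
  simp only [ltK, lt4]; rw [decide_eq_decide]; simp

theorem ltK_rank2 (a b c a' b' c' : Int) :
    ltK (2, -a, -b, -c, 0) (2, -a', -b', -c', 0) = lt3 (a', b', c') (a, b, c) := by
  simp only [ltK, lt3]; rw [decide_eq_decide]; simp; omega

theorem ltK_x0 (r a b c e : Int) (hr : 1 ≤ r) :
    ltK (r, a, b, c, e) (0, 0, 0, 0, 0) = false := by
  simp only [ltK]; rw [decide_eq_false_iff_not]; intro h; omega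

theorem ltK_0x (r a b c e : Int) (hr : 1 ≤ r) :
    ltK (0, 0, 0, 0, 0) (r, a, b, c, e) = true := by
  simp only [ltK]; rw [decide_eq_true_eq]; omega

theorem ltK_21 (a b c e a' b' c' e' : Int) :
    ltK (2, a, b, c, e) (1, a', b', c', e') = false := by
  simp only [ltK]; rw [decide_eq_false_iff_not]; intro h; omega

theorem ltK_12 (a b c e a' b' c' e' : Int) :
    ltK (1, a, b, c, e) (2, a', b', c', e') = true := by
  simp only [ltK]; rw [decide_eq_true_eq]; omega

theorem ltK_00 : ltK (0, 0, 0, 0, 0) (0, 0, 0, 0, 0) = false := by decide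

-- once the accumulator is the exact match, any step keeps it
theorem step_keep_exact (d s : Int × Int) :
    (if ltK (prioB (some d) s) (prioB (some d) d) then s else d) = d := by
  rw [prioB_exact]
  by_cases hs : s = d
  · subst hs; rw [prioB_exact, ltK_00]; simp
  · by_cases hl : s.1 ≥ d.1 ∧ s.2 ≥ d.2
    · rw [prioB_larger d s hs hl, ltK_x0 1 _ _ _ _ (by norm_num)]; simp
    · rw [prioB_other d s hs hl, ltK_x0 2 _ _ _ _ (by norm_num)]; simp

-- meeting the exact match switches the accumulator to it
theorem step_gain_exact (d m : Int × Int) (hmd : m ≠ d) :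
    (if ltK (prioB (some d) d) (prioB (some d) m) then d else m) = d := by
  rw [prioB_exact]
  by_cases hl : m.1 ≥ d.1 ∧ m.2 ≥ d.2
  · rw [prioB_larger d m hmd hl, ltK_0x 1 _ _ _ _ (by norm_num)]; simp
  · rw [prioB_other d m hmd hl, ltK_0x 2 _ _ _ _ (by norm_num)]; simp

theorem fB_exact (d : Int × Int) (t : List (Int × Int)) : fB (some d) d t = d := by
  induction t with
  | nil => rfl
  | cons s t ih => rw [fB_cons, step_keep_exact]; exact ih

-- if the exact match was or will be seen, B returns it
theorem fB_mem (d : Int × Int) (t : List (Int × Int)) :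
    ∀ m, (d ∈ t ∨ m = d) → fB (some d) m t = d := by
  induction t with
  | nil =>
    intro m hm
    rcases hm with h | h
    · exact absurd h List.not_mem_nil
    · rw [h]; rfl
  | cons s t ih =>
    intro m hm
    by_cases hmd : m = d
    · rw [hmd]; exact fB_exact d (s :: t)
    · by_cases hsd : s = d
      · rw [fB_cons, hsd, step_gain_exact d m hmd]
        exact fB_exact d t
      · have hdt : d ∈ t := by
          rcases hm with h | h
          · rcases List.mem_cons.mp h with h' | h'
            · exact absurd h'.symm hsd
            · exact h'
          · exact absurd h hmd
        rw [fB_cons]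
        exact ih _ (Or.inl hdt)

-- in "covers desired" mode B's fold is exactly A's min over the filtered list
theorem fB_larger (d : Int × Int) (t : List (Int × Int)) :
    ∀ m, d ∉ t → m ≠ d → larger d m →
    fB (some d) m t =
      pyMinN m (t.filter (fun s => decide (s.1 ≥ d.1) && decide (s.2 ≥ d.2))) := by
  induction t with
  | nil => intro m _ _ _; rfl
  | cons s t ih =>
    intro m hd hmd hml
    have hsd : s ≠ d := fun h => hd (h ▸ List.mem_cons_self)
    have hdt : d ∉ t := fun h => hd (List.mem_cons_of_mem _ h)
    rw [fB_cons, List.filter_cons]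
    by_cases hsl : s.1 ≥ d.1 ∧ s.2 ≥ d.2
    · have hfil : (decide (s.1 ≥ d.1) && decide (s.2 ≥ d.2)) = true := by
        simp [hsl.1, hsl.2]
      rw [if_pos hfil, pyMinN_cons]
      rw [prioB_larger d s hsd hsl, prioB_larger d m hmd hml, ltK_rank1]
      simp only [keyA4]
      split_ifs with hlt
      · exact ih s hdt hsd hsl
      · exact ih m hdt hmd hml
    · have hfil : ¬ ((decide (s.1 ≥ d.1) && decide (s.2 ≥ d.2)) = true) := by
        simp only [Bool.and_eq_true, decide_eq_true_eq]
        exact hsl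
      rw [if_neg hfil]
      rw [prioB_other d s hsd hsl, prioB_larger d m hmd hml, ltK_21,
        if_neg Bool.false_ne_true]
      exact ih m hdt hmd hml

-- in "largest" mode B tracks A's max until a covering size appears, then switches to min mode
theorem fB_largest (d : Int × Int) (t : List (Int × Int)) :
    ∀ m, d ∉ t → m ≠ d → ¬ larger d m →
    fB (some d) m t =
      (match t.filter (fun s => decide (s.1 ≥ d.1) && decide (s.2 ≥ d.2)) with
       | [] => pyMaxL m t
       | y :: ys => pyMinN y ys) := by
  induction t with
  | nil => intro m _ _ _; rfl
  | cons s t ih =>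
    intro m hd hmd hml
    have hsd : s ≠ d := fun h => hd (h ▸ List.mem_cons_self)
    have hdt : d ∉ t := fun h => hd (List.mem_cons_of_mem _ h)
    rw [fB_cons, List.filter_cons]
    by_cases hsl : s.1 ≥ d.1 ∧ s.2 ≥ d.2
    · have hfil : (decide (s.1 ≥ d.1) && decide (s.2 ≥ d.2)) = true := by
        simp [hsl.1, hsl.2]
      rw [if_pos hfil]
      rw [prioB_larger d s hsd hsl, prioB_other d m hmd hml, ltK_12, if_pos rfl]
      show fB (some d) s t = pyMinN s (t.filter (fun s => decide (s.1 ≥ d.1) && decide (s.2 ≥ d.2)))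
      exact fB_larger d t s hdt hsd hsl
    · have hfil : ¬ ((decide (s.1 ≥ d.1) && decide (s.2 ≥ d.2)) = true) := by
        simp only [Bool.and_eq_true, decide_eq_true_eq]
        exact hsl
      rw [if_neg hfil]
      rw [prioB_other d s hsd hsl, prioB_other d m hmd hml, ltK_rank2, pyMaxL_cons]
      simp only [keyA3]
      split_ifs with hlt
      · exact ih s hdt hsd hsl
      · exact ih m hdt hmd hml

-- with desired = None, B's fold is A's max fold
theorem fB_none (t : List (Int × Int)) : ∀ m, fB none m t = pyMaxL m t := by
  induction t with
  | nil => intro m; rfl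
  | cons s t ih =>
    intro m
    rw [fB_cons, pyMaxL_cons]
    have hk : ltK (prioB none s) (prioB none m) = lt3 (keyA3 m) (keyA3 s) := by
      show ltK (2, -(s.1 * s.2), -s.1, -s.2, 0) (2, -(m.1 * m.2), -m.1, -m.2, 0)
        = lt3 (keyA3 m) (keyA3 s)
      simp only [keyA3]
      exact ltK_rank2 _ _ _ _ _ _
    rw [hk]
    split_ifs with hlt
    · exact ih s
    · exact ih m

-- ===== VERDICT (by name: the statement is the Claim_ definition above) =====
theorem select_size_spec : Claim_equal_select_size := by
  intro available desired _ hpre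
  unfold Spec_select_size
  match available, hpre with
  | x :: t, _ =>
    match desired with
    | none =>
      show select_size (x :: t) none = select_size_alt (x :: t) none
      have h : fB none x t = pyMaxL x t := fB_none t x
      exact h.symm
    | some d =>
      show select_size (x :: t) (some d) = select_size_alt (x :: t) (some d)
      have halt : select_size_alt (x :: t) (some d) = fB (some d) x t := rfl
      rw [halt]
      by_cases hmem : d ∈ x :: t
      · have hB : fB (some d) x t = d := by
          rcases List.mem_cons.mp hmem with h | h
          · exact fB_mem d t x (Or.inr h.symm)
          · exact fB_mem d t x (Or.inl h)
        have hA : select_size (x :: t) (some d) = d := by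
          obtain ⟨dw, dh⟩ := d
          simp [select_size, hmem]
        rw [hA, hB]
      · have hxd : x ≠ d := fun h => hmem (h ▸ List.mem_cons_self)
        have hdt : d ∉ t := fun h => hmem (List.mem_cons_of_mem _ h)
        obtain ⟨dw, dh⟩ := d
        have hmem' : (dw, dh) ∉ x :: t := hmem
        simp only [select_size, if_neg hmem', List.filter_cons]
        by_cases hxl : x.1 ≥ dw ∧ x.2 ≥ dh
        · have hfil : (decide (x.1 ≥ dw) && decide (x.2 ≥ dh)) = true := by
            simp [hxl.1, hxl.2]
          rw [if_pos hfil]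
          exact (fB_larger (dw, dh) t x hdt hxd hxl).symm ▸ rfl
        · have hfil : ¬ ((decide (x.1 ≥ dw) && decide (x.2 ≥ dh)) = true) := by
            simp only [Bool.and_eq_true, decide_eq_true_eq]
            exact hxl
          rw [if_neg hfil]
          exact (fB_largest (dw, dh) t x hdt hxd hxl).symm ▸ rfl
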